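-- pv_equiv track=rewrite | github.com/Schmidtlappin/bqx_ml_v3 | scripts/remediation/remediate_stages_from_audit.py | determine_stage_type
-- ===== SOURCE A (Python) =====
-- def determine_stage_type(stage_name: str, stage_description: str) -> str:
--     """Determine the type of stage based on name and description"""
--     name_lower = stage_name.lower()
--     desc_lower = stage_description.lower() if stage_description else ""
--
--     if any(kw in name_lower for kw in ['data', 'ingest', 'extract', 'load', 'query']):
--         return 'data'
--     elif any(kw in name_lower for kw in ['model', 'train', 'ensemble', 'algorithm']):
--         return 'model'
--     elif any(kw in name_lower for kw in ['feature', 'engineer', 'bqx', 'calculation']):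
--         return 'feature'
--     elif any(kw in name_lower for kw in ['deploy', 'infrastructure', 'vertex', 'docker']):
--         return 'infrastructure'
--     elif any(kw in name_lower for kw in ['test', 'validate', 'verify']):
--         return 'testing'
--     elif any(kw in name_lower for kw in ['monitor', 'alert']):
--         return 'monitoring'
--     elif any(kw in name_lower for kw in ['security', 'iam', 'auth']):
--         return 'security'
--     elif any(kw in name_lower for kw in ['api', 'endpoint', 'service']):
--         return 'api'
--     else:
--         return 'general'
-- ===== SOURCE B (Python) =====
-- # Different algorithm: instead of searching the name for each keyword, scan the
-- # name's substrings once and look each up in a keyword->(priority, category)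
-- # hash table, keeping the hit with the smallest priority.
-- _KW = {
--     'data': (0, 'data'), 'ingest': (0, 'data'), 'extract': (0, 'data'),
--     'load': (0, 'data'), 'query': (0, 'data'),
--     'model': (1, 'model'), 'train': (1, 'model'), 'ensemble': (1, 'model'),
--     'algorithm': (1, 'model'),
--     'feature': (2, 'feature'), 'engineer': (2, 'feature'), 'bqx': (2, 'feature'),
--     'calculation': (2, 'feature'),
--     'deploy': (3, 'infrastructure'), 'infrastructure': (3, 'infrastructure'),
--     'vertex': (3, 'infrastructure'), 'docker': (3, 'infrastructure'),
--     'test': (4, 'testing'), 'validate': (4, 'testing'), 'verify': (4, 'testing'),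
--     'monitor': (5, 'monitoring'), 'alert': (5, 'monitoring'),
--     'security': (6, 'security'), 'iam': (6, 'security'), 'auth': (6, 'security'),
--     'api': (7, 'api'), 'endpoint': (7, 'api'), 'service': (7, 'api'),
-- }
-- _LENS = [3, 4, 5, 6, 7, 8, 9, 11, 14]  # the distinct keyword lengths
--
-- def determine_stage_type(stage_name: str, stage_description: str) -> str:
--     name_lower = stage_name.lower()
--     desc_lower = stage_description.lower() if stage_description else ""
--     best = None
--     for i in range(len(name_lower)):
--         for L in _LENS:
--             hit = _KW.get(name_lower[i:i + L])
--             if hit is not None and (best is None or hit[0] < best[0]):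
--                 best = hit
--     return best[1] if best is not None else 'general'
-- ===== Notes on version B (the rewrite author's own statement) =====
-- stated objective: alternative
-- what changed: Instead of searching the name once per keyword through an if/elif chain of any() scans, B slides over the name's positions and looks each candidate substring up in a keyword->(priority,category) hash table built once, keeping the lowest-priority hit.
import Mathlib
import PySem

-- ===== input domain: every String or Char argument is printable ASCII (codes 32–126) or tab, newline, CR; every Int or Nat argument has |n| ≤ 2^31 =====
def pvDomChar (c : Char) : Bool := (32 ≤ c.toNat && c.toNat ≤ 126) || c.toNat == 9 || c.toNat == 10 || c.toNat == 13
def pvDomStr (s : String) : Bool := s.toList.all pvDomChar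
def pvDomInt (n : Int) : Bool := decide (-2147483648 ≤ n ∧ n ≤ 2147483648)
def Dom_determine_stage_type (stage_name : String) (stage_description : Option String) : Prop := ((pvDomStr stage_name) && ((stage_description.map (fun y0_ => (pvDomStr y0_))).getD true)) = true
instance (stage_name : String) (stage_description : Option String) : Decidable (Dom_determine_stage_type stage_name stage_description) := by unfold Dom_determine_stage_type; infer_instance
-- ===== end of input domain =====

-- B scans the name's substrings once against a keyword->(priority, category) table
-- and keeps the lowest-priority hit, instead of A's if/elif chain of per-keyword
-- searches; equivalence of the two is proved total (objective: alternative).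


-- ===== PORT A =====
def determine_stage_type (stage_name : String) (stage_description : Option String) : String :=
  let name_lower := PySem.Str.lower stage_name
  let _desc_lower := match stage_description with
    | some d => if d ≠ "" then PySem.Str.lower d else ""
    | none => ""
  if (["data", "ingest", "extract", "load", "query"]).any (fun kw => PySem.Str.isIn kw name_lower) then "data"
  else if (["model", "train", "ensemble", "algorithm"]).any (fun kw => PySem.Str.isIn kw name_lower) then "model"
  else if (["feature", "engineer", "bqx", "calculation"]).any (fun kw => PySem.Str.isIn kw name_lower) then "feature"
  else if (["deploy", "infrastructure", "vertex", "docker"]).any (fun kw => PySem.Str.isIn kw name_lower) then "infrastructure"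
  else if (["test", "validate", "verify"]).any (fun kw => PySem.Str.isIn kw name_lower) then "testing"
  else if (["monitor", "alert"]).any (fun kw => PySem.Str.isIn kw name_lower) then "monitoring"
  else if (["security", "iam", "auth"]).any (fun kw => PySem.Str.isIn kw name_lower) then "security"
  else if (["api", "endpoint", "service"]).any (fun kw => PySem.Str.isIn kw name_lower) then "api"
  else "general"

-- ===== PORT B =====
-- the keyword -> (priority, category) table (module-level dict _KW in Source B)
def dst_kw : PySem.Dict String (Int × String) := PySem.Dict.ofList
  [("data", (0, "data")), ("ingest", (0, "data")), ("extract", (0, "data")),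
   ("load", (0, "data")), ("query", (0, "data")),
   ("model", (1, "model")), ("train", (1, "model")), ("ensemble", (1, "model")),
   ("algorithm", (1, "model")),
   ("feature", (2, "feature")), ("engineer", (2, "feature")), ("bqx", (2, "feature")),
   ("calculation", (2, "feature")),
   ("deploy", (3, "infrastructure")), ("infrastructure", (3, "infrastructure")),
   ("vertex", (3, "infrastructure")), ("docker", (3, "infrastructure")),
   ("test", (4, "testing")), ("validate", (4, "testing")), ("verify", (4, "testing")),
   ("monitor", (5, "monitoring")), ("alert", (5, "monitoring")),
   ("security", (6, "security")), ("iam", (6, "security")), ("auth", (6, "security")),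
   ("api", (7, "api")), ("endpoint", (7, "api")), ("service", (7, "api"))]

-- the distinct keyword lengths (_LENS in Source B)
def dst_lens : List Int := [3, 4, 5, 6, 7, 8, 9, 11, 14]

-- Source B's final expression: best[1] if best is not None else 'general'
def dst_finish (best : Option (Int × String)) : String :=
  match best with
  | some b => b.2
  | none => "general"

def determine_stage_type_alt (stage_name : String) (stage_description : Option String) : String :=
  let name_lower := PySem.Str.lower stage_name
  let _desc_lower := match stage_description with
    | some d => if d ≠ "" then PySem.Str.lower d else ""
    | none => ""
  let best := (PySem.List.pyRange 0 (PySem.Str.len name_lower) 1).foldl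
    (fun best i => dst_lens.foldl
      (fun best L =>
        match PySem.Dict.get? dst_kw (PySem.Str.slice name_lower (some i) (some (i + L))) with
        | some hit =>
          match best with
          | none => some hit
          | some b => if hit.1 < b.1 then some hit else best
        | none => best) best) none
  dst_finish best

-- ===== PRECONDITION & SPEC =====
def Spec_determine_stage_type (stage_name : String) (stage_description : Option String) (out : String) : Prop := out = determine_stage_type_alt stage_name stage_description
instance (stage_name : String) (stage_description : Option String) (out : String) : Decidable (Spec_determine_stage_type stage_name stage_description out) := by unfold Spec_determine_stage_type; infer_instance

-- ===== CLAIM (what is proved, stated in full; the proofs are below) =====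
def Claim_equal_determine_stage_type : Prop := ∀ (stage_name : String) (stage_description : Option String), Dom_determine_stage_type stage_name stage_description → Spec_determine_stage_type stage_name stage_description (determine_stage_type stage_name stage_description)

-- ===== LEMMAS AND PROOFS =====

-- proof-side copies of B's table data
def dstPairs : List (String × (Int × String)) :=
  [("data", (0, "data")), ("ingest", (0, "data")), ("extract", (0, "data")),
   ("load", (0, "data")), ("query", (0, "data")),
   ("model", (1, "model")), ("train", (1, "model")), ("ensemble", (1, "model")),
   ("algorithm", (1, "model")),
   ("feature", (2, "feature")), ("engineer", (2, "feature")), ("bqx", (2, "feature")),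
   ("calculation", (2, "feature")),
   ("deploy", (3, "infrastructure")), ("infrastructure", (3, "infrastructure")),
   ("vertex", (3, "infrastructure")), ("docker", (3, "infrastructure")),
   ("test", (4, "testing")), ("validate", (4, "testing")), ("verify", (4, "testing")),
   ("monitor", (5, "monitoring")), ("alert", (5, "monitoring")),
   ("security", (6, "security")), ("iam", (6, "security")), ("auth", (6, "security")),
   ("api", (7, "api")), ("endpoint", (7, "api")), ("service", (7, "api"))]

def dstGroups : List (List String) :=
  [["data", "ingest", "extract", "load", "query"],
   ["model", "train", "ensemble", "algorithm"],
   ["feature", "engineer", "bqx", "calculation"],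
   ["deploy", "infrastructure", "vertex", "docker"],
   ["test", "validate", "verify"],
   ["monitor", "alert"],
   ["security", "iam", "auth"],
   ["api", "endpoint", "service"]]

def dstCats : List String :=
  ["data", "model", "feature", "infrastructure", "testing", "monitoring", "security", "api"]

-- "some keyword of group g occurs in nl"
def dstM (nl : String) (g : Nat) : Bool :=
  (dstGroups.getD g []).any (fun kw => PySem.Str.isIn kw nl)

-- A's if/elif chain, phrased through dstM (definitionally A's body on name_lower)
def dstChain (nl : String) : String :=
  if dstM nl 0 then "data"
  else if dstM nl 1 then "model"
  else if dstM nl 2 then "feature"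
  else if dstM nl 3 then "infrastructure"
  else if dstM nl 4 then "testing"
  else if dstM nl 5 then "monitoring"
  else if dstM nl 6 then "security"
  else if dstM nl 7 then "api"
  else "general"

-- the list of table hits B's nested loops scan, in scan order
def dstHits (nl : String) : List (Int × String) :=
  (PySem.List.pyRange 0 (PySem.Str.len nl) 1).flatMap
    (fun i => dst_lens.filterMap
      (fun L => PySem.Dict.get? dst_kw (PySem.Str.slice nl (some i) (some (i + L)))))

-- B's loop-body update (the named form of the inline match in the port)
def dst_upd (best : Option (Int × String)) (hit : Int × String) : Option (Int × String) :=
  match best with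
  | none => some hit
  | some b => if hit.1 < b.1 then some hit else best

lemma foldl_filterMap_eq {α β γ : Type} (l : List α) (f : α → Option β) (g : γ → β → γ) (b : γ) :
    (l.filterMap f).foldl g b = l.foldl (fun b x => match f x with | some y => g b y | none => b) b := by
  induction l generalizing b with
  | nil => rfl
  | cons x xs ih => cases h : f x <;> simp [h, ih]

lemma foldl_flatMap_eq {α β γ : Type} (l : List α) (f : α → List β) (g : γ → β → γ) (b : γ) :
    (l.flatMap f).foldl g b = l.foldl (fun b x => (f x).foldl g b) b := by
  induction l generalizing b <;> simp_all [List.flatMap_cons, List.foldl_append]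

lemma A_unfold (sn : String) (sd : Option String) :
    determine_stage_type sn sd = dstChain (PySem.Str.lower sn) := rfl

set_option maxHeartbeats 4000000 in
lemma B_unfold (sn : String) (sd : Option String) :
    determine_stage_type_alt sn sd =
      dst_finish ((dstHits (PySem.Str.lower sn)).foldl dst_upd none) := by
  unfold determine_stage_type_alt dstHits
  rw [foldl_flatMap_eq]
  refine congrArg dst_finish ?_
  refine congrFun (congrFun (congrArg List.foldl ?_) none) _
  funext b i
  rw [foldl_filterMap_eq]
  refine congrFun (congrFun (congrArg List.foldl ?_) b) dst_lens
  funext b' L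
  cases dst_kw.get? (PySem.Str.slice (PySem.Str.lower sn) (some i) (some (i + L))) with
  | none => rfl
  | some hit => cases b' <;> rfl

lemma dst_keys_nodup : dst_kw.keys.Nodup := by decide

set_option maxHeartbeats 1600000 in
lemma dst_items : dst_kw.items = dstPairs := by decide

lemma get?_dst (s : String) (v : Int × String) :
    dst_kw.get? s = some v ↔ (s, v) ∈ dstPairs := by
  rw [PySem.Dict.get?_eq_some_iff_mem_items dst_kw dst_keys_nodup (k := s) (v := v), dst_items]

lemma dstPairs_facts : ∀ p ∈ dstPairs, p.1.toList ≠ [] ∧ ((p.1.toList.length : Int) ∈ dst_lens) := by decide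

lemma dstPairs_group : ∀ p ∈ dstPairs,
    ∃ g ∈ List.range 8, p.2 = ((g : Int), dstCats.getD g "") ∧ p.1 ∈ dstGroups.getD g [] := by decide

lemma dstGroups_pairs : ∀ g ∈ List.range 8, ∀ kw ∈ dstGroups.getD g [],
    (kw, ((g : Int), dstCats.getD g "")) ∈ dstPairs := by decide

lemma dst_lens_nonneg : ∀ L ∈ dst_lens, (0 : Int) ≤ L := by decide

lemma slice_infix (nl : String) (i L : Int) (hi : 0 ≤ i) (hL : 0 ≤ L) :
    (PySem.Str.slice nl (some i) (some (i + L))).toList <:+: nl.toList := by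
  have h0 : (0 : Int) ≤ i + L := by omega
  have ht : (PySem.Str.slice nl (some i) (some (i + L))).toList
      = PySem.List.slice nl.toList (some i) (some (i + L)) := by simp
  rw [ht, PySem.List.slice_toNat nl.toList hi h0]
  exact (List.take_prefix _ _).isInfix.trans (List.drop_suffix _ _).isInfix

lemma exists_slice_iff (nl kw : String) (hne : kw.toList ≠ [])
    (hlen : ((kw.toList.length : Int)) ∈ dst_lens) :
    (∃ i ∈ PySem.List.pyRange 0 (PySem.Str.len nl) 1, ∃ L ∈ dst_lens,
        PySem.Str.slice nl (some i) (some (i + L)) = kw)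
      ↔ PySem.Str.isIn kw nl = true := by
  constructor
  · rintro ⟨i, hi, L, hL, hs⟩
    have hi' := (PySem.List.mem_pyRange_one).mp hi
    rw [PySem.Str.isIn_iff_infix, ← hs]
    exact slice_infix nl i L hi'.1 (dst_lens_nonneg L hL)
  · intro h
    rw [PySem.Str.isIn_iff_infix] at h
    obtain ⟨s, t, hst⟩ := h
    have hlen' : nl.length = s.length + (kw.length + t.length) := by
      have := congrArg List.length hst
      simpa using this.symm
    have hkw1 : 1 ≤ kw.length := by
      have : kw.toList.length ≠ 0 := fun hc => hne (List.eq_nil_of_length_eq_zero hc)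
      simpa using Nat.one_le_iff_ne_zero.mpr (by simpa using this)
    refine ⟨(s.length : Int), ?_, (kw.toList.length : Int), hlen, ?_⟩
    · refine (PySem.List.mem_pyRange_one).mpr ⟨by positivity, ?_⟩
      have hl : PySem.Str.len nl = (nl.length : Int) := by simp
      rw [hl]
      exact_mod_cast (by omega : s.length < nl.length)
    · apply String.toList_inj.mp
      have ht : (PySem.Str.slice nl (some (s.length : Int))
            (some ((s.length : Int) + (kw.toList.length : Int)))).toList
          = PySem.List.slice nl.toList (some (s.length : Int))
            (some ((s.length : Int) + (kw.toList.length : Int))) := by simp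
      rw [ht, PySem.List.slice_natCast_add, ← hst, List.append_assoc, List.drop_left,
        List.take_left]

lemma mem_hits (nl : String) (h : Int × String) :
    h ∈ dstHits nl ↔ ∃ g ∈ List.range 8, h = ((g : Int), dstCats.getD g "") ∧ dstM nl g = true := by
  unfold dstHits
  simp only [List.mem_flatMap, List.mem_filterMap]
  constructor
  · rintro ⟨i, hi, L, hL, hget⟩
    have hp := (get?_dst _ _).mp hget
    obtain ⟨g, hg8, he, hgrp⟩ := dstPairs_group _ hp
    refine ⟨g, hg8, he, ?_⟩
    have hi' := (PySem.List.mem_pyRange_one).mp hi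
    have hinf := slice_infix nl i L hi'.1 (dst_lens_nonneg L hL)
    exact List.any_eq_true.mpr ⟨_, hgrp, (PySem.Str.isIn_iff_infix _ _).mpr hinf⟩
  · rintro ⟨g, hg8, he, hm⟩
    subst he
    obtain ⟨kw, hkw, hisin⟩ := List.any_eq_true.mp hm
    have hp : (kw, ((g : Int), dstCats.getD g "")) ∈ dstPairs := dstGroups_pairs g hg8 kw hkw
    have hfacts := dstPairs_facts _ hp
    obtain ⟨i, hi, L, hL, hs⟩ := (exists_slice_iff nl kw hfacts.1 hfacts.2).mpr hisin
    exact ⟨i, hi, L, hL, by rw [hs]; exact (get?_dst _ _).mpr hp⟩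

lemma fold_upd_some : ∀ (hs : List (Int × String)) (p : Int × String),
    ∃ q, hs.foldl dst_upd (some p) = some q ∧ (q = p ∨ q ∈ hs) := by
  intro hs
  induction hs with
  | nil => exact fun p => ⟨p, rfl, Or.inl rfl⟩
  | cons h t ih =>
    intro p
    simp only [List.foldl_cons]
    by_cases hlt : h.1 < p.1
    · rw [show dst_upd (some p) h = some h from by simp [dst_upd, hlt]]
      obtain ⟨q, hq, hmem⟩ := ih h
      exact ⟨q, hq, Or.inr (hmem.elim (fun e => by simp [e]) (fun m => by simp [m]))⟩
    · rw [show dst_upd (some p) h = some p from by simp [dst_upd, hlt]]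
      obtain ⟨q, hq, hmem⟩ := ih p
      exact ⟨q, hq, hmem.elim Or.inl (fun m => Or.inr (List.mem_cons_of_mem _ m))⟩

lemma fold_upd_min : ∀ (hs : List (Int × String)) (p r : Int × String),
    hs.foldl dst_upd (some p) = some r → r.1 ≤ p.1 ∧ ∀ h ∈ hs, ¬ h.1 < r.1 := by
  intro hs
  induction hs with
  | nil =>
    intro p r hr
    simp only [List.foldl_nil, Option.some.injEq] at hr
    subst hr
    exact ⟨le_refl _, by simp⟩
  | cons h t ih =>
    intro p r hr
    simp only [List.foldl_cons] at hr
    by_cases hlt : h.1 < p.1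
    · rw [show dst_upd (some p) h = some h from by simp [dst_upd, hlt]] at hr
      obtain ⟨hle, hmin⟩ := ih h r hr
      refine ⟨le_trans hle (le_of_lt hlt), ?_⟩
      intro h' hm
      rcases List.mem_cons.mp hm with e | m
      · subst e; exact fun c => lt_irrefl _ (lt_of_lt_of_le c hle)
      · exact hmin h' m
    · rw [show dst_upd (some p) h = some p from by simp [dst_upd, hlt]] at hr
      obtain ⟨hle, hmin⟩ := ih p r hr
      refine ⟨hle, ?_⟩
      intro h' hm
      rcases List.mem_cons.mp hm with e | m
      · subst e; exact fun c => hlt (lt_of_lt_of_le c hle)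
      · exact hmin h' m

lemma fold_none_spec (hs : List (Int × String)) :
    (hs = [] ∧ hs.foldl dst_upd none = none) ∨
    ∃ r, hs.foldl dst_upd none = some r ∧ r ∈ hs ∧ ∀ h ∈ hs, ¬ h.1 < r.1 := by
  cases hs with
  | nil => exact Or.inl ⟨rfl, rfl⟩
  | cons h t =>
    right
    have hstep : (h :: t).foldl dst_upd none = t.foldl dst_upd (some h) := rfl
    obtain ⟨q, hq, hmem⟩ := fold_upd_some t h
    obtain ⟨hle, hmin⟩ := fold_upd_min t h q hq
    refine ⟨q, by rw [hstep, hq], ?_, ?_⟩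
    · rcases hmem with e | m
      · exact e ▸ List.mem_cons_self
      · exact List.mem_cons_of_mem _ m
    · intro h' hm
      rcases List.mem_cons.mp hm with e | m
      · subst e; exact fun c => lt_irrefl _ (lt_of_lt_of_le c hle)
      · exact hmin h' m

lemma chain_eq (nl : String) :
    dst_finish ((dstHits nl).foldl dst_upd none) = dstChain nl := by
  rcases fold_none_spec (dstHits nl) with ⟨hnil, hres⟩ | ⟨r, hres, hmem, hmin⟩
  · rw [hres]
    show "general" = dstChain nl
    have hall : ∀ g ∈ List.range 8, dstM nl g = false := by
      intro g hg
      rcases Bool.eq_false_or_eq_true (dstM nl g) with ht | hf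
      · exfalso
        have : ((g : Int), dstCats.getD g "") ∈ dstHits nl := (mem_hits nl _).mpr ⟨g, hg, rfl, ht⟩
        rw [hnil] at this
        exact absurd this (List.not_mem_nil)
      · exact hf
    have h0 := hall 0 (by decide); have h1 := hall 1 (by decide)
    have h2 := hall 2 (by decide); have h3 := hall 3 (by decide)
    have h4 := hall 4 (by decide); have h5 := hall 5 (by decide)
    have h6 := hall 6 (by decide); have h7 := hall 7 (by decide)
    simp [dstChain, h0, h1, h2, h3, h4, h5, h6, h7]
  · rw [hres]
    show r.2 = dstChain nl
    obtain ⟨g0, hg0, he, hm0⟩ := (mem_hits nl r).mp hmem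
    have hg08 : g0 < 8 := List.mem_range.mp hg0
    have hming : ∀ g, g < 8 → dstM nl g = true → g0 ≤ g := by
      intro g hg hmg
      have hmem' : ((g : Int), dstCats.getD g "") ∈ dstHits nl :=
        (mem_hits nl _).mpr ⟨g, List.mem_range.mpr hg, rfl, hmg⟩
      have hnl := hmin _ hmem'
      rw [he] at hnl
      simp only [not_lt] at hnl
      exact_mod_cast hnl
    have hfalse : ∀ g, g < g0 → dstM nl g = false := by
      intro g hg
      rcases Bool.eq_false_or_eq_true (dstM nl g) with ht | hf
      · exact absurd (hming g (by omega) ht) (by omega)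
      · exact hf
    rw [he]
    interval_cases g0
    · simp [dstChain, dstCats, hm0]
    · simp [dstChain, dstCats, hm0, hfalse 0 (by omega)]
    · simp [dstChain, dstCats, hm0, hfalse 0 (by omega), hfalse 1 (by omega)]
    · simp [dstChain, dstCats, hm0, hfalse 0 (by omega), hfalse 1 (by omega), hfalse 2 (by omega)]
    · simp [dstChain, dstCats, hm0, hfalse 0 (by omega), hfalse 1 (by omega), hfalse 2 (by omega),
        hfalse 3 (by omega)]
    · simp [dstChain, dstCats, hm0, hfalse 0 (by omega), hfalse 1 (by omega), hfalse 2 (by omega),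
        hfalse 3 (by omega), hfalse 4 (by omega)]
    · simp [dstChain, dstCats, hm0, hfalse 0 (by omega), hfalse 1 (by omega), hfalse 2 (by omega),
        hfalse 3 (by omega), hfalse 4 (by omega), hfalse 5 (by omega)]
    · simp [dstChain, dstCats, hm0, hfalse 0 (by omega), hfalse 1 (by omega), hfalse 2 (by omega),
        hfalse 3 (by omega), hfalse 4 (by omega), hfalse 5 (by omega), hfalse 6 (by omega)]

-- ===== VERDICT (by name: the statement is the Claim_ definition above) =====
theorem determine_stage_type_spec : Claim_equal_determine_stage_type := by
  intro sn sd _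
  unfold Spec_determine_stage_type
  rw [A_unfold, B_unfold, chain_eq]
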